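-- pv_equiv track=rewrite | github.com/namjmnam/Compounder | wordsimilar.py | aroundIndex
-- ===== SOURCE A (Python) =====
-- def aroundIndex(indexlist, maxindex, distance=2):
--     out = []
--     for i in indexlist:
--         temp = list(range(i-distance,i+1+distance))
--         for j in temp:
--             # if j >=0 and j < maxindex and j not in indexlist: out.append(j) # 자신이 포함된 어절의 인덱스 포함 안함
--             if j >=0 and j < maxindex: out.append(j)
--     out = list(dict.fromkeys(out))
--     out.sort()
--     return out
-- ===== SOURCE B (Python) =====
-- def aroundIndex(indexlist, maxindex, distance=2):
--     # Sort a copy, sweep merging clamped windows into intervals; output is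
--     # emitted already sorted and duplicate-free (no dedup/sort pass needed).
--     out = []
--     lo = hi = None
--     for i in sorted(indexlist):
--         a = max(0, i - distance)
--         b = min(maxindex - 1, i + distance)
--         if a > b:
--             continue
--         if lo is None:
--             lo, hi = a, b
--         elif a <= hi + 1:
--             hi = max(hi, b)
--         else:
--             out.extend(range(lo, hi + 1))
--             lo, hi = a, b
--     if lo is not None:
--         out.extend(range(lo, hi + 1))
--     return out
-- ===== Notes on version B (the rewrite author's own statement) =====
-- stated objective: faster
-- what changed: Instead of emitting every window element per index and then deduplicating with dict.fromkeys and sorting, B sorts a copy of the indices once and sweeps them merging clamped windows into maximal intervals, emitting each output element exactly once already in order.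
import Mathlib
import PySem

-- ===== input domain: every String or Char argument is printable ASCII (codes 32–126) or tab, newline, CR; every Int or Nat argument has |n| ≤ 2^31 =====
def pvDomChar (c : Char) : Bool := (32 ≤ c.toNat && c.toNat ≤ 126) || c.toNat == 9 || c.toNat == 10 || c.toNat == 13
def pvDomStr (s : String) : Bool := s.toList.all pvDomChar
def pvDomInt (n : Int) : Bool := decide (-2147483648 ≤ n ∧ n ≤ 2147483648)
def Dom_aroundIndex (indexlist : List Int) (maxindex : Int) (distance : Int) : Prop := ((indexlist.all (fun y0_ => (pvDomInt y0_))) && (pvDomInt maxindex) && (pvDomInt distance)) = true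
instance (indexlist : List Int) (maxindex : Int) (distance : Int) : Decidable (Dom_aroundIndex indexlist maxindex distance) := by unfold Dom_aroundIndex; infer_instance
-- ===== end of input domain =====

-- B replaces A's emit-all-windows + dict-dedup + sort by a single interval-merging
-- sweep over a sorted copy of the indices, emitting each output element once, in order.

-- ===== PORT A =====
def aroundIndex (indexlist : List Int) (maxindex : Int) (distance : Int) : List Int :=
  -- out = []; for i in indexlist: for j in range(i-distance, i+1+distance): if 0<=j<maxindex: out.append(j)
  let out : List Int := indexlist.foldl (fun out i =>
    (PySem.List.pyRange (i - distance) (i + 1 + distance) 1).foldl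
      (fun out j => if 0 ≤ j ∧ j < maxindex then out ++ [j] else out) out) []
  -- out = list(dict.fromkeys(out)); out.sort()
  PySem.List.sorted (PySem.List.dedup out) (fun x => x) false

-- ===== PORT B =====
-- one loop step of B's sweep (state: output so far, current open interval [lo,hi] or none)
def aiStep (maxindex : Int) (distance : Int)
    (st : List Int × Option (Int × Int)) (i : Int) : List Int × Option (Int × Int) :=
  let a := max 0 (i - distance)
  let b := min (maxindex - 1) (i + distance)
  if a > b then st
  else
    match st.2 with
    | none => (st.1, some (a, b))
    | some (lo, hi) =>
      if a ≤ hi + 1 then (st.1, some (lo, max hi b))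
      else (st.1 ++ PySem.List.pyRange lo (hi + 1) 1, some (a, b))

-- final flush: 'if lo is not None: out.extend(range(lo, hi+1))'
def aiFlush (st : List Int × Option (Int × Int)) : List Int :=
  match st.2 with
  | none => st.1
  | some (lo, hi) => st.1 ++ PySem.List.pyRange lo (hi + 1) 1

def aroundIndex_alt (indexlist : List Int) (maxindex : Int) (distance : Int) : List Int :=
  aiFlush ((PySem.List.sorted indexlist (fun x => x) false).foldl
    (aiStep maxindex distance) ([], none))

-- ===== PRECONDITION & SPEC =====
def Spec_aroundIndex (indexlist : List Int) (maxindex : Int) (distance : Int) (out : List Int) : Prop := out = aroundIndex_alt indexlist maxindex distance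
instance (indexlist : List Int) (maxindex : Int) (distance : Int) (out : List Int) : Decidable (Spec_aroundIndex indexlist maxindex distance out) := by unfold Spec_aroundIndex; infer_instance

-- ===== CLAIM (what is proved, stated in full; the proofs are below) =====
def Claim_equal_aroundIndex : Prop := ∀ (indexlist : List Int) (maxindex : Int) (distance : Int), Dom_aroundIndex indexlist maxindex distance → Spec_aroundIndex indexlist maxindex distance (aroundIndex indexlist maxindex distance)

-- ===== LEMMAS AND PROOFS =====

-- A's accumulated list contains exactly the clamped window elements.
lemma memA (indexlist : List Int) (mx d j : Int) :
    (j ∈ indexlist.foldl (fun out i =>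
      (PySem.List.pyRange (i - d) (i + 1 + d) 1).foldl
        (fun out j => if 0 ≤ j ∧ j < mx then out ++ [j] else out) out) []) ↔
    (0 ≤ j ∧ j < mx ∧ ∃ i, i ∈ indexlist ∧ i - d ≤ j ∧ j ≤ i + d) := by
  have h1 : ∀ (out : List Int) (i : Int),
      (PySem.List.pyRange (i - d) (i + 1 + d) 1).foldl
        (fun out j => if 0 ≤ j ∧ j < mx then out ++ [j] else out) out
      = out ++ (PySem.List.pyRange (i - d) (i + 1 + d) 1).filter
          (fun j => decide (0 ≤ j ∧ j < mx)) := by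
    intro out i
    exact PySem.List.foldl_append_ite_eq_filter _ _ _
  rw [PySem.List.foldl_congr_mem indexlist _ (fun out i =>
      out ++ (PySem.List.pyRange (i - d) (i + 1 + d) 1).filter
        (fun j => decide (0 ≤ j ∧ j < mx))) [] (fun acc x _ => h1 acc x)]
  rw [PySem.List.foldl_append_eq_flatMap]
  simp only [List.nil_append, List.mem_flatMap, List.mem_filter,
    PySem.List.mem_pyRange_one, decide_eq_true_eq]
  constructor
  · rintro ⟨i, hi, ⟨hj1, hj2⟩, hj3, hj4⟩
    exact ⟨hj3, hj4, i, hi, by omega, by omega⟩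
  · rintro ⟨h0, hmx, i, hi, hw1, hw2⟩
    exact ⟨i, hi, ⟨by omega, by omega⟩, h0, hmx⟩

-- Invariant of B's sweep while an interval [lo,hi] is open.
lemma sweep_inv (mx d : Int) : ∀ (t acc : List Int) (lo hi : Int),
    t.Pairwise (· ≤ ·) →
    acc.Pairwise (· < ·) →
    (∀ x ∈ acc, x + 1 < lo) →
    lo ≤ hi →
    (∀ i ∈ t, lo ≤ max 0 (i - d)) →
    (aiFlush (t.foldl (aiStep mx d) (acc, some (lo, hi)))).Pairwise (· < ·) ∧
    ∀ j, (j ∈ aiFlush (t.foldl (aiStep mx d) (acc, some (lo, hi)))) ↔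
      (j ∈ acc ∨ (lo ≤ j ∧ j ≤ hi) ∨
        (0 ≤ j ∧ j < mx ∧ ∃ i, i ∈ t ∧ i - d ≤ j ∧ j ≤ i + d)) := by
  intro t
  induction t with
  | nil =>
    intro acc lo hi _ hacc hlt hlohi _
    simp only [List.foldl_nil, aiFlush]
    constructor
    · refine List.pairwise_append.2 ⟨hacc, PySem.List.pairwise_lt_pyRange_one _ _, ?_⟩
      intro x hx y hy
      have := hlt x hx
      have := (PySem.List.mem_pyRange_one).1 hy
      omega
    · intro j
      simp only [List.mem_append, PySem.List.mem_pyRange_one, List.not_mem_nil]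
      constructor
      · rintro (h | h)
        · exact Or.inl h
        · exact Or.inr (Or.inl (by omega))
      · rintro (h | h | ⟨_, _, _, h, _⟩)
        · exact Or.inl h
        · exact Or.inr (by omega)
        · exact h.elim
  | cons i t ih =>
    intro acc lo hi hsort hacc hlt hlohi hlo
    have hsort' : t.Pairwise (· ≤ ·) := hsort.tail
    have hhead : ∀ i' ∈ t, i ≤ i' := fun i' h => (List.pairwise_cons.1 hsort).1 i' h
    have hloa : lo ≤ max 0 (i - d) := hlo i (List.mem_cons_self)
    simp only [List.foldl_cons]
    by_cases hab : max 0 (i - d) > min (mx - 1) (i + d)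
    · -- empty window: state unchanged, i contributes nothing
      have hstep : aiStep mx d (acc, some (lo, hi)) i = (acc, some (lo, hi)) := by
        simp [aiStep, hab]
      rw [hstep]
      obtain ⟨hp, hm⟩ := ih acc lo hi hsort' hacc hlt hlohi (fun i' h => hlo i' (List.mem_cons_of_mem _ h))
      refine ⟨hp, fun j => ?_⟩
      rw [hm j]
      constructor
      · rintro (h | h | ⟨h0, hmx, i', hi', hw⟩)
        · exact Or.inl h
        · exact Or.inr (Or.inl h)
        · exact Or.inr (Or.inr ⟨h0, hmx, i', List.mem_cons_of_mem _ hi', hw⟩)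
      · rintro (h | h | ⟨h0, hmx, i', hi', hw⟩)
        · exact Or.inl h
        · exact Or.inr (Or.inl h)
        · rcases List.mem_cons.1 hi' with rfl | hi'
          · omega
          · exact Or.inr (Or.inr ⟨h0, hmx, i', hi', hw⟩)
    · by_cases hmerge : max 0 (i - d) ≤ hi + 1
      · -- window overlaps/adjoins current interval: extend it
        have hstep : aiStep mx d (acc, some (lo, hi)) i
            = (acc, some (lo, max hi (min (mx - 1) (i + d)))) := by
          simp [aiStep, hab, hmerge]
        rw [hstep]
        obtain ⟨hp, hm⟩ := ih acc lo (max hi (min (mx - 1) (i + d))) hsort' hacc hlt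
          (by omega) (fun i' h => hlo i' (List.mem_cons_of_mem _ h))
        refine ⟨hp, fun j => ?_⟩
        rw [hm j]
        constructor
        · rintro (h | h | ⟨h0, hmx, i', hi', hw⟩)
          · exact Or.inl h
          · by_cases hj : j ≤ hi
            · exact Or.inr (Or.inl ⟨h.1, hj⟩)
            · exact Or.inr (Or.inr ⟨by omega, by omega, i, List.mem_cons_self, by omega, by omega⟩)
          · exact Or.inr (Or.inr ⟨h0, hmx, i', List.mem_cons_of_mem _ hi', hw⟩)
        · rintro (h | h | ⟨h0, hmx, i', hi', hw⟩)
          · exact Or.inl h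
          · exact Or.inr (Or.inl ⟨h.1, by omega⟩)
          · rcases List.mem_cons.1 hi' with rfl | hi'
            · exact Or.inr (Or.inl (by omega))
            · exact Or.inr (Or.inr ⟨h0, hmx, i', hi', hw⟩)
      · -- gap: flush [lo,hi] and open a new interval
        have hstep : aiStep mx d (acc, some (lo, hi)) i
            = (acc ++ PySem.List.pyRange lo (hi + 1) 1,
               some (max 0 (i - d), min (mx - 1) (i + d))) := by
          simp [aiStep, hab, hmerge]
        rw [hstep]
        have hacc' : (acc ++ PySem.List.pyRange lo (hi + 1) 1).Pairwise (· < ·) := by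
          refine List.pairwise_append.2 ⟨hacc, PySem.List.pairwise_lt_pyRange_one _ _, ?_⟩
          intro x hx y hy
          have := hlt x hx
          have := (PySem.List.mem_pyRange_one).1 hy
          omega
        have hlt' : ∀ x ∈ acc ++ PySem.List.pyRange lo (hi + 1) 1, x + 1 < max 0 (i - d) := by
          intro x hx
          rcases List.mem_append.1 hx with hx | hx
          · have := hlt x hx; omega
          · have := (PySem.List.mem_pyRange_one).1 hx; omega
        obtain ⟨hp, hm⟩ := ih (acc ++ PySem.List.pyRange lo (hi + 1) 1)
          (max 0 (i - d)) (min (mx - 1) (i + d)) hsort' hacc' hlt' (by omega)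
          (fun i' h => by have := hhead i' h; omega)
        refine ⟨hp, fun j => ?_⟩
        rw [hm j]
        simp only [List.mem_append, PySem.List.mem_pyRange_one]
        constructor
        · rintro ((h | h) | h | ⟨h0, hmx, i', hi', hw⟩)
          · exact Or.inl h
          · exact Or.inr (Or.inl (by omega))
          · exact Or.inr (Or.inr ⟨by omega, by omega, i, List.mem_cons_self, by omega, by omega⟩)
          · exact Or.inr (Or.inr ⟨h0, hmx, i', List.mem_cons_of_mem _ hi', hw⟩)
        · rintro (h | h | ⟨h0, hmx, i', hi', hw⟩)
          · exact Or.inl (Or.inl h)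
          · exact Or.inl (Or.inr (by omega))
          · rcases List.mem_cons.1 hi' with rfl | hi'
            · exact Or.inr (Or.inl (by omega))
            · exact Or.inr (Or.inr ⟨h0, hmx, i', hi', hw⟩)

-- The sweep from the initial (no interval open) state.
lemma sweep_none (mx d : Int) : ∀ t : List Int, t.Pairwise (· ≤ ·) →
    (aiFlush (t.foldl (aiStep mx d) ([], none))).Pairwise (· < ·) ∧
    ∀ j, (j ∈ aiFlush (t.foldl (aiStep mx d) ([], none))) ↔
      (0 ≤ j ∧ j < mx ∧ ∃ i, i ∈ t ∧ i - d ≤ j ∧ j ≤ i + d) := by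
  intro t
  induction t with
  | nil =>
    intro _
    simp [aiFlush]
  | cons i t ih =>
    intro hsort
    have hsort' : t.Pairwise (· ≤ ·) := hsort.tail
    have hhead : ∀ i' ∈ t, i ≤ i' := fun i' h => (List.pairwise_cons.1 hsort).1 i' h
    simp only [List.foldl_cons]
    by_cases hab : max 0 (i - d) > min (mx - 1) (i + d)
    · have hstep : aiStep mx d ([], none) i = ([], none) := by
        simp [aiStep, hab]
      rw [hstep]
      obtain ⟨hp, hm⟩ := ih hsort'
      refine ⟨hp, fun j => ?_⟩
      rw [hm j]
      constructor
      · rintro ⟨h0, hmx, i', hi', hw⟩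
        exact ⟨h0, hmx, i', List.mem_cons_of_mem _ hi', hw⟩
      · rintro ⟨h0, hmx, i', hi', hw⟩
        rcases List.mem_cons.1 hi' with rfl | hi'
        · omega
        · exact ⟨h0, hmx, i', hi', hw⟩
    · have hstep : aiStep mx d ([], none) i
          = ([], some (max 0 (i - d), min (mx - 1) (i + d))) := by
        simp [aiStep, hab]
      rw [hstep]
      obtain ⟨hp, hm⟩ := sweep_inv mx d t [] (max 0 (i - d)) (min (mx - 1) (i + d))
        hsort' List.Pairwise.nil (by simp) (by omega)
        (fun i' h => by have := hhead i' h; omega)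
      refine ⟨hp, fun j => ?_⟩
      rw [hm j]
      simp only [List.not_mem_nil, false_or]
      constructor
      · rintro (h | ⟨h0, hmx, i', hi', hw⟩)
        · exact ⟨by omega, by omega, i, List.mem_cons_self, by omega, by omega⟩
        · exact ⟨h0, hmx, i', List.mem_cons_of_mem _ hi', hw⟩
      · rintro ⟨h0, hmx, i', hi', hw⟩
        rcases List.mem_cons.1 hi' with rfl | hi'
        · exact Or.inl (by omega)
        · exact Or.inr ⟨h0, hmx, i', hi', hw⟩

-- ===== VERDICT (by name: the statement is the Claim_ definition above) =====
theorem aroundIndex_spec : Claim_equal_aroundIndex := by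
  intro indexlist mx d _
  unfold Spec_aroundIndex aroundIndex aroundIndex_alt
  have hsorted : (PySem.List.sorted indexlist (fun x => x) false).Pairwise (· ≤ ·) :=
    PySem.List.sorted_pairwise indexlist (fun x => x)
  obtain ⟨hp, hm⟩ := sweep_none mx d (PySem.List.sorted indexlist (fun x => x) false) hsorted
  refine PySem.List.sorted_eq_of_perm_of_pairwise_lt _ _ _ ?_ hp
  refine (List.perm_ext_iff_of_nodup (hp.imp fun h => ne_of_lt h) (PySem.List.nodup_dedup _)).2 ?_
  intro j
  rw [hm j, PySem.List.mem_dedup, memA]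
  constructor
  · rintro ⟨h0, hmx, i, hi, hw⟩
    exact ⟨h0, hmx, i, (PySem.List.mem_sorted _ _ _ _).1 hi, hw⟩
  · rintro ⟨h0, hmx, i, hi, hw⟩
    exact ⟨h0, hmx, i, (PySem.List.mem_sorted _ _ _ _).2 hi, hw⟩
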